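-- pv_equiv track=rewrite | github.com/fantasmaopera735/Buscaflo | PaleFlo.py | clasificar_numero
-- ===== SOURCE A (Python) =====
-- GRUPOS = {
--     'CERRADOS': {'digitos': {0, 6, 8, 9}, 'numeros': []},
--     'ABIERTOS': {'digitos': {2, 3, 5}, 'numeros': []},
--     'RECTOS': {'digitos': {1, 4, 7}, 'numeros': []}
-- }
--
-- def clasificar_numero(numero):
--     """Clasifica un número en su grupo, si ambos dígitos pertenecen al mismo grupo"""
--     try:
--         num_str = f"{int(numero):02d}"
--         d1, d2 = int(num_str[0]), int(num_str[1])
--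
--         for grupo, datos in GRUPOS.items():
--             if d1 in datos['digitos'] and d2 in datos['digitos']:
--                 return grupo
--         return None
--     except:
--         return None
-- ===== SOURCE B (Python) =====
-- GRUPOS = {
--     'CERRADOS': {'digitos': {0, 6, 8, 9}, 'numeros': []},
--     'ABIERTOS': {'digitos': {2, 3, 5}, 'numeros': []},
--     'RECTOS': {'digitos': {1, 4, 7}, 'numeros': []}
-- }
--
-- # Flat inverted table: digit -> group name (the three digit sets partition 0-9).
-- TABLA = {d: grupo for grupo, datos in GRUPOS.items() for d in datos['digitos']}
--
-- def clasificar_numero(numero):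
--     """Clasifica un número en su grupo, si ambos dígitos pertenecen al mismo grupo"""
--     try:
--         num_str = f"{int(numero):02d}"
--         g1 = TABLA.get(int(num_str[0]))
--         g2 = TABLA.get(int(num_str[1]))
--         if g1 is not None and g1 == g2:
--             return g1
--         return None
--     except:
--         return None
-- ===== Notes on version B (the rewrite author's own statement) =====
-- stated objective: idiomatic
-- what changed: Replaces the loop over GRUPOS with a flat inverted dict digit->group built once, classifying by two table lookups compared for equality instead of scanning the three digit sets.
import Mathlib
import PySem

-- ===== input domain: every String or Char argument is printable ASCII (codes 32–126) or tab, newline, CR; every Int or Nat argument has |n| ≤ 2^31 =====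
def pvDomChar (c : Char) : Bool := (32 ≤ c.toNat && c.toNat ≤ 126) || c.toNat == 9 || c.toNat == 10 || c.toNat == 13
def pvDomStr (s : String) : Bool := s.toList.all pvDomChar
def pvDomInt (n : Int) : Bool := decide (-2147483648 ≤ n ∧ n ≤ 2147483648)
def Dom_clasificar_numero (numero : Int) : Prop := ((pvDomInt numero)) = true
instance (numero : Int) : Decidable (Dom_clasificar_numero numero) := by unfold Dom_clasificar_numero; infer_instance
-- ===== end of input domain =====

-- B replaces A's scan over the three groups with one flat digit->group table and two lookups (idiomatic).


-- ===== PORT A =====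
-- GRUPOS, in dict insertion order, keeping only the 'digitos' sets (the 'numeros' lists are unused).
def pvGrupos : List (String × List Int) :=
  [("CERRADOS", [0, 6, 8, 9]), ("ABIERTOS", [2, 3, 5]), ("RECTOS", [1, 4, 7])]

-- f"{n:02d}": str(n), zero-padded to width 2; only "0".."9" have length < 2, so a single '0' in front is exact.
def pvFmt02 (n : Int) : List Char :=
  let s := PySem.Int.toChars n
  if s.length < 2 then '0' :: s else s

-- the for-loop over GRUPOS.items()
def pvFindGrupo (d1 d2 : Int) : List (String × List Int) → Option String
  | [] => none
  | (grupo, digitos) :: rest =>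
    if d1 ∈ digitos ∧ d2 ∈ digitos then some grupo else pvFindGrupo d1 d2 rest

-- the bare except returns None exactly where int(num_str[i]) fails (num_str always has ≥ 2 chars).
def clasificar_numero (numero : Int) : Option String :=
  let num_str := pvFmt02 numero
  match PySem.List.pyGet? num_str 0, PySem.List.pyGet? num_str 1 with
  | some c1, some c2 =>
    match PySem.Int.ofChars? [c1], PySem.Int.ofChars? [c2] with
    | some d1, some d2 => pvFindGrupo d1 d2 pvGrupos
    | _, _ => none
  | _, _ => none

-- ===== PORT B =====
-- TABLA: flat dict digit -> group name, in the comprehension's insertion order.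
def pvTabla : PySem.Dict Int String :=
  PySem.Dict.ofList [(0, "CERRADOS"), (6, "CERRADOS"), (8, "CERRADOS"), (9, "CERRADOS"),
   (2, "ABIERTOS"), (3, "ABIERTOS"), (5, "ABIERTOS"),
   (1, "RECTOS"), (4, "RECTOS"), (7, "RECTOS")]

-- B's f"{n:02d}": same formatting, zero-pad written with replicate
def pvFmt02B (n : Int) : List Char :=
  let s := PySem.Int.toChars n
  List.replicate (2 - s.length) '0' ++ s

def clasificar_numero_alt (numero : Int) : Option String :=
  let num_str := pvFmt02B numero
  let dig := fun (i : Int) => (PySem.List.pyGet? num_str i).bind (fun c => PySem.Int.ofChars? [c])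
  match dig 0 with
  | none => none
  | some d1 =>
    match dig 1 with
    | none => none
    | some d2 =>
      let g1 := PySem.Dict.get? pvTabla d1
      let g2 := PySem.Dict.get? pvTabla d2
      if g1 ≠ none ∧ g1 = g2 then g1 else none

-- ===== PRECONDITION & SPEC =====
def Spec_clasificar_numero (numero : Int) (out : Option String) : Prop := out = clasificar_numero_alt numero
instance (numero : Int) (out : Option String) : Decidable (Spec_clasificar_numero numero out) := by unfold Spec_clasificar_numero; infer_instance

-- ===== CLAIM (what is proved, stated in full; the proofs are below) =====
def Claim_equal_clasificar_numero : Prop := ∀ (numero : Int), Dom_clasificar_numero numero → Spec_clasificar_numero numero (clasificar_numero numero)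

-- ===== LEMMAS AND PROOFS =====
-- B's table lookup as a closed if-chain
theorem pvTabla_get (d : Int) : PySem.Dict.get? pvTabla d =
    (if d = 0 ∨ d = 6 ∨ d = 8 ∨ d = 9 then some "CERRADOS"
     else if d = 2 ∨ d = 3 ∨ d = 5 then some "ABIERTOS"
     else if d = 1 ∨ d = 4 ∨ d = 7 then some "RECTOS" else none) := by
  have h : pvTabla = PySem.Dict.mk [(0, "CERRADOS"), (6, "CERRADOS"), (8, "CERRADOS"), (9, "CERRADOS"),
      (2, "ABIERTOS"), (3, "ABIERTOS"), (5, "ABIERTOS"),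
      (1, "RECTOS"), (4, "RECTOS"), (7, "RECTOS")] := by decide
  rw [h]
  simp only [PySem.Dict.get?_mk_cons]
  split_ifs <;> simp_all [PySem.Dict.get?, List.find?] <;> omega

-- core: A's group scan equals B's table comparison, for arbitrary ints d1 d2
theorem pvFind_eq_tabla (d1 d2 : Int) :
    pvFindGrupo d1 d2 pvGrupos =
      (let g1 := PySem.Dict.get? pvTabla d1
       let g2 := PySem.Dict.get? pvTabla d2
       if g1 ≠ none ∧ g1 = g2 then g1 else none) := by
  simp only [pvTabla_get, pvFindGrupo, pvGrupos, List.mem_cons, List.not_mem_nil, or_false]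
  split_ifs <;> simp_all <;> omega

theorem pvToDigitsCore_len (b : Nat) : ∀ (fuel n : Nat) (acc : List Char),
    acc.length ≤ (Nat.toDigitsCore b fuel n acc).length := by
  intro fuel
  induction fuel with
  | zero => intro n acc; simp [Nat.toDigitsCore]
  | succ f ih =>
    intro n acc
    simp only [Nat.toDigitsCore]
    split
    · simp
    · have := ih (n / b) (Nat.digitChar (n % b) :: acc)
      simp at this; omega

-- str(n) has at least one character
theorem pvToChars_len (n : Int) : (PySem.Int.toChars n).length ≠ 0 := by
  unfold PySem.Int.toChars
  split
  · simp
  · show (Nat.toDigits 10 n.toNat).length ≠ 0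
    unfold Nat.toDigits
    simp only [Nat.toDigitsCore]
    split
    · simp
    · have := pvToDigitsCore_len 10 n.toNat (n.toNat / 10) [Nat.digitChar (n.toNat % 10)]
      simp at this; omega

-- so the two paddings agree
theorem pvFmt02_eq (n : Int) : pvFmt02B n = pvFmt02 n := by
  have h1 : (PySem.Int.toChars n).length ≠ 0 := pvToChars_len n
  unfold pvFmt02 pvFmt02B
  by_cases h : (PySem.Int.toChars n).length < 2
  · have : 2 - (PySem.Int.toChars n).length = 1 := by omega
    simp [h, this]
  · have : 2 - (PySem.Int.toChars n).length = 0 := by omega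
    simp [h, this]

theorem pv_main (numero : Int) : clasificar_numero numero = clasificar_numero_alt numero := by
  unfold clasificar_numero clasificar_numero_alt
  rw [pvFmt02_eq]
  cases h0 : PySem.List.pyGet? (pvFmt02 numero) 0 with
  | none => simp [h0]
  | some c1 =>
    cases h1 : PySem.List.pyGet? (pvFmt02 numero) 1 with
    | none =>
      simp only [h0, h1, Option.bind_some, Option.bind_none]
      cases PySem.Int.ofChars? [c1] <;> rfl
    | some c2 =>
      simp only [h0, h1, Option.bind_some]
      cases e1 : PySem.Int.ofChars? [c1] with
      | none => simp
      | some d1 =>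
        cases e2 : PySem.Int.ofChars? [c2] with
        | none => simp
        | some d2 => simpa using pvFind_eq_tabla d1 d2

-- ===== VERDICT (by name: the statement is the Claim_ definition above) =====
theorem clasificar_numero_spec : Claim_equal_clasificar_numero := by
  intro numero _
  exact pv_main numero
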